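-- pv_equiv track=rewrite | github.com/WilsonWangTHU/NerveNet | environments/centipede_generator.py | _add_body
-- ===== SOURCE A (Python) =====
-- LEG_XML = '''
-- <body name="legbody_{LEG_ID}" pos="0.0 {LEG_LEN_2} 0">
--   <joint axis="0 0 1" name="hip_{LEG_ID}" pos="0.0 0.0 0.0" range="-40 40" type="hinge"/>
--   <geom fromto="0.0 0.0 0.0 0.0 {LEG_LEN_2} 0.0" name="legGeom_{LEG_ID}" size="0.08" type="capsule" rgba=".08 .5 .3 1"/>
--   <body pos="0 {LEG_LEN_2} 0" name="frontFoot_{LEG_ID}">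
--     <joint axis="{AXIS} 0 0" name="ankle_{LEG_ID}" pos="0.0 0.0 0.0" range="30 100" type="hinge"/>
--     <geom fromto="0.0 0.0 0.0 0 {LEG_LEN_3} 0.0" name="ankleGeom_{LEG_ID}" size="0.08" type="capsule" rgba=".08 .5 .3 1"/>
--   </body>
-- </body>
-- '''
--
-- BODY_XML_HEAD = '''
-- <body name="torso_{BODY_ID}" pos="0.50 0 0">
--   <geom name="torsoGeom_{BODY_ID}" pos="0 0 0" size="0.25" type="sphere" density="100"/>
--   <joint axis="0 0 1" name="body_{BODY_ID}" pos="-0.25 0.0 0.0" range="-20 20" type="hinge"/>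
--   <joint axis="0 1 0" name="bodyupdown_{BODY_ID}" pos="-0.25 0.0 0.0" range="-10 30" type="hinge"/>
-- '''
--
-- LEG_PARA = {
--     '{LEG_LEN_1}': 0.25,
--     '{LEG_LEN_2}': 0.28,
--     '{LEG_LEN_3}': 0.6,
--     '{AXIS}': -1
-- }
--
-- def _add_leg(xml_content, current_leg_id, indent_level):
--     '''
--         @brief: add one leg to the model
--     '''
--     is_right_leg = (current_leg_id % 2) * 2 - 1
--     xml_to_add = LEG_XML.replace('{LEG_ID}', str(current_leg_id))
--     # NOTE: break the left right symmetry here!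
--     if is_right_leg > 0:
--         xml_to_add = xml_to_add.replace('hip_', 'righthip_')
--     else:
--         xml_to_add = xml_to_add.replace('hip_', 'lefthip_')
--     for para in LEG_PARA:
--         xml_to_add = xml_to_add.replace(para,
--                                         str(LEG_PARA[para] * is_right_leg))
--
--     xml_list = ['  ' * indent_level + lines
--                 for lines in xml_to_add.split('\n')]
--     xml_content += ('\n'.join(xml_list) + '\n')
--
--     return xml_content, current_leg_id + 1
--
-- def _add_body(xml_content, current_leg_id, current_body_id,
--               indent_level, num_legs):
--     if num_legs <= 0:
--         return xml_content
--     else: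
--
--         # add the body head xml
--         body_xml_head = BODY_XML_HEAD.replace('{BODY_ID}', str(current_body_id))
--         body_xml_list = ['  ' * indent_level + lines
--                          for lines in body_xml_head.split('\n')]
--         xml_content += ('\n'.join(body_xml_list) + '\n')
--
--         # add two legs or one legs
--         if num_legs >= 2:
--             xml_content, current_leg_id = _add_leg(xml_content, current_leg_id,
--                                                    indent_level + 1)
--             xml_content, current_leg_id = _add_leg(xml_content, current_leg_id,
--                                                    indent_level + 1)
--         else:
--             xml_content, current_leg_id = _add_leg(xml_content, current_leg_id,
--                                                    indent_level + 1)
--         # add another layer of body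
--         xml_content = _add_body(
--             xml_content, current_leg_id,
--             current_body_id + 1, indent_level + 1,
--             num_legs - 2
--         )
--
--         # add the body tail xml
--         xml_content += ('  ' * indent_level + '</body>\n')
--         return xml_content
-- ===== SOURCE B (Python) =====
-- LEG_XML = '''
-- <body name="legbody_{LEG_ID}" pos="0.0 {LEG_LEN_2} 0">
--   <joint axis="0 0 1" name="hip_{LEG_ID}" pos="0.0 0.0 0.0" range="-40 40" type="hinge"/>
--   <geom fromto="0.0 0.0 0.0 0.0 {LEG_LEN_2} 0.0" name="legGeom_{LEG_ID}" size="0.08" type="capsule" rgba=".08 .5 .3 1"/>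
--   <body pos="0 {LEG_LEN_2} 0" name="frontFoot_{LEG_ID}">
--     <joint axis="{AXIS} 0 0" name="ankle_{LEG_ID}" pos="0.0 0.0 0.0" range="30 100" type="hinge"/>
--     <geom fromto="0.0 0.0 0.0 0 {LEG_LEN_3} 0.0" name="ankleGeom_{LEG_ID}" size="0.08" type="capsule" rgba=".08 .5 .3 1"/>
--   </body>
-- </body>
-- '''
--
-- BODY_XML_HEAD = '''
-- <body name="torso_{BODY_ID}" pos="0.50 0 0">
--   <geom name="torsoGeom_{BODY_ID}" pos="0 0 0" size="0.25" type="sphere" density="100"/>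
--   <joint axis="0 0 1" name="body_{BODY_ID}" pos="-0.25 0.0 0.0" range="-20 20" type="hinge"/>
--   <joint axis="0 1 0" name="bodyupdown_{BODY_ID}" pos="-0.25 0.0 0.0" range="-10 30" type="hinge"/>
-- '''
--
-- LEG_PARA = {
--     '{LEG_LEN_1}': 0.25,
--     '{LEG_LEN_2}': 0.28,
--     '{LEG_LEN_3}': 0.6,
--     '{AXIS}': -1
-- }
--
--
-- def _indent_block(text, level):
--     """Prefix every line of text with level indents and add a final newline."""
--     return '\n'.join('  ' * level + line for line in text.split('\n')) + '\n'
--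
--
-- def _leg_block(leg_id, level):
--     """The text one leg contributes, already indented."""
--     is_right_leg = (leg_id % 2) * 2 - 1
--     side = 'righthip_' if is_right_leg > 0 else 'lefthip_'
--     text = LEG_XML.replace('{LEG_ID}', str(leg_id)).replace('hip_', side)
--     for para, value in LEG_PARA.items():
--         text = text.replace(para, str(value * is_right_leg))
--     return _indent_block(text, level)
--
--
-- def _add_body(xml_content, current_leg_id, current_body_id,
--               indent_level, num_legs):
--     if num_legs <= 0:
--         return xml_content
--     levels = (num_legs + 1) // 2
--     parts = [xml_content]
--     for i in range(levels):
--         level = indent_level + i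
--         head = BODY_XML_HEAD.replace('{BODY_ID}', str(current_body_id + i))
--         parts.append(_indent_block(head, level))
--         parts.append(_leg_block(current_leg_id + 2 * i, level + 1))
--         if 2 * i + 2 <= num_legs:
--             parts.append(_leg_block(current_leg_id + 2 * i + 1, level + 1))
--     for i in reversed(range(levels)):
--         parts.append('  ' * (indent_level + i) + '</body>\n')
--     return ''.join(parts)
-- ===== Notes on version B (the rewrite author's own statement) =====
-- stated objective: alternative
-- what changed: Replaced the recursive nesting of _add_body by an iterative two-phase build: a forward loop over the (num_legs+1)//2 levels with closed-form per-level leg/body ids appending head and leg blocks to a parts list, then a reverse loop emitting the '</body>' close tags, joined once at the end.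
import Mathlib
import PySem

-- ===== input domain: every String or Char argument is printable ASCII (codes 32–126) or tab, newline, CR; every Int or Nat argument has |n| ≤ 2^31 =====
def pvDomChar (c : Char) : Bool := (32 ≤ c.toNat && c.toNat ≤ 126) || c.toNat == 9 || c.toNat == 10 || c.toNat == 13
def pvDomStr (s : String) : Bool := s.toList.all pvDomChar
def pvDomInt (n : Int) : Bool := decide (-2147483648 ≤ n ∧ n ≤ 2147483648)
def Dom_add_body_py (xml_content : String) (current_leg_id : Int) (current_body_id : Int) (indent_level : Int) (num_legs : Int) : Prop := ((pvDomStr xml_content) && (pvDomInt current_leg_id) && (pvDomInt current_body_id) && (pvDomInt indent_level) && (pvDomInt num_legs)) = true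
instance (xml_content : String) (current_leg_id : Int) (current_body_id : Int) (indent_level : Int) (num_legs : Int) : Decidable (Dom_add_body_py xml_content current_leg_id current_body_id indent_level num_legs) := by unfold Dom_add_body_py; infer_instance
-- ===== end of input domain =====

-- B replaces A's recursion by a forward loop over nesting levels (closed-form ids per level)
-- followed by a reverse loop emitting the close tags, collecting the
-- blocks in a list joined once: objective 'alternative' (a different decomposition, same output).

def legXml : String := "\n<body name=\"legbody_{LEG_ID}\" pos=\"0.0 {LEG_LEN_2} 0\">\n  <joint axis=\"0 0 1\" name=\"hip_{LEG_ID}\" pos=\"0.0 0.0 0.0\" range=\"-40 40\" type=\"hinge\"/>\n  <geom fromto=\"0.0 0.0 0.0 0.0 {LEG_LEN_2} 0.0\" name=\"legGeom_{LEG_ID}\" size=\"0.08\" type=\"capsule\" rgba=\".08 .5 .3 1\"/>\n  <body pos=\"0 {LEG_LEN_2} 0\" name=\"frontFoot_{LEG_ID}\">\n    <joint axis=\"{AXIS} 0 0\" name=\"ankle_{LEG_ID}\" pos=\"0.0 0.0 0.0\" range=\"30 100\" type=\"hinge\"/>\n    <geom fromto=\"0.0 0.0 0.0 0 {LEG_LEN_3}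 0.0\" name=\"ankleGeom_{LEG_ID}\" size=\"0.08\" type=\"capsule\" rgba=\".08 .5 .3 1\"/>\n  </body>\n</body>\n"

def bodyXmlHead : String := "\n<body name=\"torso_{BODY_ID}\" pos=\"0.50 0 0\">\n  <geom name=\"torsoGeom_{BODY_ID}\" pos=\"0 0 0\" size=\"0.25\" type=\"sphere\" density=\"100\"/>\n  <joint axis=\"0 0 1\" name=\"body_{BODY_ID}\" pos=\"-0.25 0.0 0.0\" range=\"-20 20\" type=\"hinge\"/>\n  <joint axis=\"0 1 0\" name=\"bodyupdown_{BODY_ID}\" pos=\"-0.25 0.0 0.0\" range=\"-10 30\" type=\"hinge\"/>\n"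

-- s.split('\n') for the literal separator "\n" (nonempty, so split? is always some); exact.
def pySplitNL (s : String) : List String := (PySem.Str.split? s "\n").getD []

-- Python "'  ' * n" for an int n (empty for n ≤ 0); exact hand port, shared primitive of both ports.
def strMul2 (n : Int) : String := String.join (List.replicate n.toNat "  ")

-- str(LEG_PARA[para] * is_right_leg) for is_right_leg = 1 / -1: the four float/int constants are
-- fixed, so the resulting Python strings are hardcoded literally (pair = (value*1, value*-1)); exact.
def legParaTbl : List (String × String × String) :=
  [("{LEG_LEN_1}", "0.25", "-0.25"), ("{LEG_LEN_2}", "0.28", "-0.28"),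
   ("{LEG_LEN_3}", "0.6", "-0.6"), ("{AXIS}", "-1", "1")]

-- ===== PORT A =====

-- _add_leg: returns (xml_content + leg text, current_leg_id + 1)
def aAddLeg (xml_content : String) (current_leg_id : Int) (indent_level : Int) : String × Int :=
  let is_right_leg : Int := (PySem.Int.mod current_leg_id 2) * 2 - 1
  let t0 := PySem.Str.replace legXml "{LEG_ID}" (PySem.Int.toStr current_leg_id)
  let t1 := if is_right_leg > 0 then PySem.Str.replace t0 "hip_" "righthip_"
            else PySem.Str.replace t0 "hip_" "lefthip_"
  let t2 := legParaTbl.foldl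
      (fun t p => PySem.Str.replace t p.1 (if is_right_leg > 0 then p.2.1 else p.2.2)) t1
  let xml_list := (pySplitNL t2).map (fun lines => strMul2 indent_level ++ lines)
  (xml_content ++ (PySem.Str.join "\n" xml_list ++ "\n"), current_leg_id + 1)

def add_body_py (xml_content : String) (current_leg_id : Int) (current_body_id : Int) (indent_level : Int) (num_legs : Int) : String :=
  if num_legs ≤ 0 then xml_content
  else
    let body_xml_head := PySem.Str.replace bodyXmlHead "{BODY_ID}" (PySem.Int.toStr current_body_id)
    let body_xml_list := (pySplitNL body_xml_head).map
        (fun lines => strMul2 indent_level ++ lines)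
    let x1 := xml_content ++ (PySem.Str.join "\n" body_xml_list ++ "\n")
    let st :=
      if num_legs ≥ 2 then
        let p := aAddLeg x1 current_leg_id (indent_level + 1)
        aAddLeg p.1 p.2 (indent_level + 1)
      else aAddLeg x1 current_leg_id (indent_level + 1)
    let x3 := add_body_py st.1 st.2 (current_body_id + 1) (indent_level + 1) (num_legs - 2)
    x3 ++ (strMul2 indent_level ++ "</body>\n")
termination_by num_legs.toNat
decreasing_by omega

-- ===== PORT B =====

-- _indent_block: prefix every line with level indents, add a final newline
def bIndentBlock (text : String) (level : Int) : String :=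
  PySem.Str.join "\n" ((pySplitNL text).map (fun line => strMul2 level ++ line)) ++ "\n"

-- _leg_block: the text one leg contributes, already indented
def bLegBlock (leg_id : Int) (level : Int) : String :=
  let is_right_leg : Int := (PySem.Int.mod leg_id 2) * 2 - 1
  let side := if is_right_leg > 0 then "righthip_" else "lefthip_"
  let t0 := PySem.Str.replace (PySem.Str.replace legXml "{LEG_ID}" (PySem.Int.toStr leg_id)) "hip_" side
  let t := legParaTbl.foldl
      (fun t p => PySem.Str.replace t p.1 (if is_right_leg > 0 then p.2.1 else p.2.2)) t0
  bIndentBlock t level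

-- body of the forward for-loop over levels (i is the level index)
def bLevelStep (current_leg_id current_body_id indent_level num_legs : Int)
    (acc : String) (i : Nat) : String :=
  let level : Int := indent_level + i
  let acc1 := acc ++ bIndentBlock
      (PySem.Str.replace bodyXmlHead "{BODY_ID}" (PySem.Int.toStr (current_body_id + i))) level
  let acc2 := acc1 ++ bLegBlock (current_leg_id + 2 * i) (level + 1)
  if 2 * (i : Int) + 2 ≤ num_legs then acc2 ++ bLegBlock (current_leg_id + 2 * i + 1) (level + 1)
  else acc2

-- body of the reverse for-loop emitting close tags
def bCloseStep (indent_level : Int) (acc : String) (i : Nat) : String :=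
  acc ++ (strMul2 (indent_level + i) ++ "</body>\n")

def add_body_py_alt (xml_content : String) (current_leg_id : Int) (current_body_id : Int) (indent_level : Int) (num_legs : Int) : String :=
  if num_legs ≤ 0 then xml_content
  else
    let levels : Nat := (PySem.Int.floordiv (num_legs + 1) 2).toNat
    let mid := (List.range levels).foldl
        (bLevelStep current_leg_id current_body_id indent_level num_legs) xml_content
    (List.range levels).reverse.foldl (bCloseStep indent_level) mid

-- ===== PRECONDITION & SPEC =====
def Spec_add_body_py (xml_content : String) (current_leg_id : Int) (current_body_id : Int) (indent_level : Int) (num_legs : Int) (out : String) : Prop := out = add_body_py_alt xml_content current_leg_id current_body_id indent_level num_legs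
instance (xml_content : String) (current_leg_id : Int) (current_body_id : Int) (indent_level : Int) (num_legs : Int) (out : String) : Decidable (Spec_add_body_py xml_content current_leg_id current_body_id indent_level num_legs out) := by unfold Spec_add_body_py; infer_instance

-- ===== CLAIM (what is proved, stated in full; the proofs are below) =====
def Claim_equal_add_body_py : Prop := ∀ (xml_content : String) (current_leg_id : Int) (current_body_id : Int) (indent_level : Int) (num_legs : Int), Dom_add_body_py xml_content current_leg_id current_body_id indent_level num_legs → Spec_add_body_py xml_content current_leg_id current_body_id indent_level num_legs (add_body_py xml_content current_leg_id current_body_id indent_level num_legs)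

-- ===== LEMMAS AND PROOFS =====

theorem floordiv2_eq (n : Int) : PySem.Int.floordiv n 2 = n / 2 :=
  PySem.Int.floordiv_eq_ediv_of_pos (by norm_num)

-- _add_leg appends exactly one leg block and bumps the id
theorem aAddLeg_eq (x : String) (id lvl : Int) :
    aAddLeg x id lvl = (x ++ bLegBlock id lvl, id + 1) := by
  simp only [aAddLeg, bLegBlock, bIndentBlock]
  by_cases h : (PySem.Int.mod id 2) * 2 - 1 > 0
  · rw [if_pos h, if_pos h]
  · rw [if_neg h, if_neg h]

-- shifting the loop index by one = shifting the per-level parameters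
theorem shift_level (cl cb il nl : Int) (acc : String) (i : Nat) :
    bLevelStep cl cb il nl acc (i + 1) = bLevelStep (cl + 2) (cb + 1) (il + 1) (nl - 2) acc i := by
  simp only [bLevelStep]
  push_cast
  by_cases h : 2 * (i : Int) + 2 ≤ nl - 2
  · rw [if_pos h, if_pos (by omega : 2 * ((i : Int) + 1) + 2 ≤ nl)]
    ring_nf
  · rw [if_neg (by omega : ¬ 2 * ((i : Int) + 1) + 2 ≤ nl), if_neg h]
    ring_nf

theorem shift_close (il : Int) (acc : String) (i : Nat) :
    bCloseStep il acc (i + 1) = bCloseStep (il + 1) acc i := by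
  simp only [bCloseStep]
  push_cast
  ring_nf

theorem fold_level_shift (cl cb il nl : Int) (x : String) (k : Nat) :
    (List.range (k + 1)).foldl (bLevelStep cl cb il nl) x
      = (List.range k).foldl (bLevelStep (cl + 2) (cb + 1) (il + 1) (nl - 2))
          (bLevelStep cl cb il nl x 0) := by
  rw [List.range_succ_eq_map, List.foldl_cons, List.foldl_map]
  simp only [Nat.succ_eq_add_one, shift_level]

theorem fold_close_shift (il : Int) (m : String) (k : Nat) :
    (List.range (k + 1)).reverse.foldl (bCloseStep il) m
      = bCloseStep il ((List.range k).reverse.foldl (bCloseStep (il + 1)) m) 0 := by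
  rw [List.range_succ_eq_map]
  simp only [List.reverse_cons, ← List.map_reverse, List.foldl_append, List.foldl_map,
    List.foldl_cons, List.foldl_nil, Nat.succ_eq_add_one, shift_close]

-- B's port, expanded to its two folds when the level count is known
theorem alt_expand (m : String) (cl cb il nl : Int) (k : Nat)
    (hk : (PySem.Int.floordiv (nl + 1) 2).toNat = k) :
    add_body_py_alt m cl cb il nl
      = (List.range k).reverse.foldl (bCloseStep il)
          ((List.range k).foldl (bLevelStep cl cb il nl) m) := by
  rw [floordiv2_eq] at hk
  by_cases h : nl ≤ 0
  · have hk0 : k = 0 := by omega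
    subst hk0
    simp [add_body_py_alt, h]
  · rw [add_body_py_alt, if_neg h, floordiv2_eq, hk]

-- level 0 of the forward loop, written out (two legs / one leg)
theorem step_zero_two (cl cb il nl : Int) (x : String) (h2 : 2 ≤ nl) :
    bLevelStep cl cb il nl x 0
      = x ++ bIndentBlock (PySem.Str.replace bodyXmlHead "{BODY_ID}" (PySem.Int.toStr cb)) il
          ++ bLegBlock cl (il + 1) ++ bLegBlock (cl + 1) (il + 1) := by
  simp only [bLevelStep]
  rw [if_pos (by push_cast; omega : 2 * ((0 : Nat) : Int) + 2 ≤ nl)]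
  simp only [Nat.cast_zero, add_zero, mul_zero]

theorem step_zero_one (cl cb il nl : Int) (x : String) (h2 : ¬ 2 ≤ nl) :
    bLevelStep cl cb il nl x 0
      = x ++ bIndentBlock (PySem.Str.replace bodyXmlHead "{BODY_ID}" (PySem.Int.toStr cb)) il
          ++ bLegBlock cl (il + 1) := by
  simp only [bLevelStep]
  rw [if_neg (by push_cast; omega : ¬ 2 * ((0 : Nat) : Int) + 2 ≤ nl)]
  simp only [Nat.cast_zero, add_zero, mul_zero]

theorem key_lemma : ∀ (k : Nat) (x : String) (cl cb il nl : Int),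
    (PySem.Int.floordiv (nl + 1) 2).toNat = k →
    add_body_py x cl cb il nl = add_body_py_alt x cl cb il nl := by
  intro k
  induction k with
  | zero =>
    intro x cl cb il nl hk
    rw [floordiv2_eq] at hk
    have hnl : nl ≤ 0 := by omega
    rw [add_body_py, add_body_py_alt, if_pos hnl, if_pos hnl]
  | succ k ih =>
    intro x cl cb il nl hk
    have hk2 := hk
    rw [floordiv2_eq] at hk2
    have hnl : 1 ≤ nl := by omega
    have hk' : (PySem.Int.floordiv (nl - 2 + 1) 2).toNat = k := by
      rw [floordiv2_eq]; omega
    rw [alt_expand x cl cb il nl (k + 1) hk, fold_level_shift, fold_close_shift]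
    rw [add_body_py, if_neg (by omega : ¬ nl ≤ 0)]
    simp only [aAddLeg_eq]
    by_cases h2 : nl ≥ 2
    · rw [if_pos h2]
      dsimp only
      rw [show cl + 1 + 1 = cl + 2 from by ring,
        ih _ _ _ _ _ hk', alt_expand _ _ _ _ _ k hk',
        step_zero_two cl cb il nl x h2]
      simp only [bIndentBlock, bCloseStep, Nat.cast_zero, add_zero]
    · rw [if_neg h2]
      dsimp only
      have hk0 : k = 0 := by omega
      subst hk0
      rw [ih _ _ _ _ _ hk', alt_expand _ _ _ _ _ 0 (by rw [floordiv2_eq]; omega),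
        step_zero_one cl cb il nl x h2]
      simp only [List.range_zero, List.reverse_nil, List.foldl_nil, bCloseStep, bIndentBlock,
        Nat.cast_zero, add_zero]

-- ===== VERDICT (by name: the statement is the Claim_ definition above) =====
theorem add_body_py_spec : Claim_equal_add_body_py := by
  intro x cl cb il nl _
  unfold Spec_add_body_py
  exact key_lemma _ x cl cb il nl rfl
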